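-- pv_equiv track=rewrite | github.com/Amegatron/python-expensive-invocations | src/main.py | natural_stack
-- ===== SOURCE A (Python) =====
-- def natural_stack(length=9, iterations=200):
--     stack = []
--     stack.append(1)
--
--     for i in range(iterations):
--         for j in range(length - 1):
--             stack.append(j)
--
--         acc = 0
--         while len(stack) > 0:
--             acc += stack.pop()
--
--         stack.append(acc)
--
--     return stack.pop()
-- ===== SOURCE B (Python) =====
-- def natural_stack(length=9, iterations=200):
--     m = length - 1 if length > 1 else 0
--     it = iterations if iterations > 0 else 0
--     return 1 + it * (m * (m - 1) // 2)
-- ===== Notes on version B (the rewrite author's own statement) =====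
-- stated objective: faster
-- what changed: Replaced the iterations*length push/pop simulation with the closed form 1 + max(iterations,0)*C(max(length-1,0),2), since each iteration just adds the sum 0+1+...+(length-2) to the accumulator.
import Mathlib
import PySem

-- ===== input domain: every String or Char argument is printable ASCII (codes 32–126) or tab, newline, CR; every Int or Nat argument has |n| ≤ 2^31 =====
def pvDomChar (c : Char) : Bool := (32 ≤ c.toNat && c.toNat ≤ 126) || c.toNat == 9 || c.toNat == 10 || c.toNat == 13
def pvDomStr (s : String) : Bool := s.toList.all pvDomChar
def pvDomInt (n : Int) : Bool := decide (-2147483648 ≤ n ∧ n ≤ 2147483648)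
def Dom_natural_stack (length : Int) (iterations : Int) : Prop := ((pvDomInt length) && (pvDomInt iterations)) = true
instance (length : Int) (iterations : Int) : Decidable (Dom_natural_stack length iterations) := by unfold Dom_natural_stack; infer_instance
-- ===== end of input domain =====

-- B replaces A's push/pop simulation by the closed form 1 + max(iterations,0)*C(max(length-1,0),2) (objective: faster, O(1)).

-- ===== PORT A =====
-- 'while len(stack) > 0: acc += stack.pop()' — pops from the end, one element per step
def pvWhileSum (stack : List Int) (acc : Int) : Int :=
  match _h : stack.getLast? with
  | none => acc
  | some v => pvWhileSum stack.dropLast (acc + v)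
termination_by stack.length
decreasing_by
  cases stack with
  | nil => simp at _h
  | cons x xs => simp [List.length_dropLast]

-- the body of 'for i in range(iterations)'
def pvIterStep (length : Int) (stack : List Int) (_i : Int) : List Int :=
  let stack := stack ++ PySem.List.pyRange 0 (length - 1) 1  -- for j in range(length-1): stack.append(j)
  let acc := pvWhileSum stack 0
  [acc]                                                      -- stack.append(acc) on the now-empty stack

def natural_stack (length : Int) (iterations : Int) : Int :=
  -- stack = []; stack.append(1); the loop; the final stack.pop() (provably nonempty here)
  match ((PySem.List.pyRange 0 iterations 1).foldl (pvIterStep length) (([] : List Int) ++ [1])).getLast? with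
  | some v => v
  | none => 0

-- ===== PORT B =====
def pvM (length : Int) : Int := if length > 1 then length - 1 else 0
def pvIt (iterations : Int) : Int := if iterations > 0 then iterations else 0
def natural_stack_alt (length : Int) (iterations : Int) : Int :=
  1 + pvIt iterations * PySem.Int.floordiv (pvM length * (pvM length - 1)) 2

-- ===== PRECONDITION & SPEC =====
def Spec_natural_stack (length : Int) (iterations : Int) (out : Int) : Prop := out = natural_stack_alt length iterations
instance (length : Int) (iterations : Int) (out : Int) : Decidable (Spec_natural_stack length iterations out) := by unfold Spec_natural_stack; infer_instance

-- ===== CLAIM (what is proved, stated in full; the proofs are below) =====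
def Claim_equal_natural_stack : Prop := ∀ (length : Int) (iterations : Int), Dom_natural_stack length iterations → Spec_natural_stack length iterations (natural_stack length iterations)

-- ===== LEMMAS AND PROOFS =====

theorem pvWhileSum_eq (stack : List Int) (acc : Int) : pvWhileSum stack acc = acc + stack.sum := by
  induction stack using List.reverseRecOn generalizing acc with
  | nil => simp [pvWhileSum]
  | append_singleton s x ih =>
      rw [pvWhileSum]
      simp only [List.dropLast_concat, ih]
      split
      · rename_i hn; simp at hn
      · rename_i v hv
        simp at hv
        subst hv
        simp [List.sum_append]
        ring

theorem pvIterStep_single (length v i : Int) :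
    pvIterStep length [v] i = [v + (PySem.List.pyRange 0 (length - 1) 1).sum] := by
  simp [pvIterStep, pvWhileSum_eq]

theorem foldl_pvIterStep (length : Int) (l : List Int) (v : Int) :
    l.foldl (pvIterStep length) [v] = [v + l.length * (PySem.List.pyRange 0 (length - 1) 1).sum] := by
  induction l generalizing v with
  | nil => simp
  | cons a l ih =>
      rw [List.foldl_cons, pvIterStep_single, ih]
      simp
      ring

theorem sum_range_int (t : Nat) :
    2 * ((List.range t).map (fun k : Nat => (0:Int) + (k:Int))).sum = (t:Int) * ((t:Int) - 1) := by
  induction t with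
  | zero => simp
  | succ t ih =>
      rw [List.range_succ, List.map_append, List.sum_append]
      simp only [List.map_cons, List.map_nil, List.sum_cons, List.sum_nil]
      push_cast
      push_cast at ih
      linarith

theorem sum_pyRange_two (n : Int) :
    2 * (PySem.List.pyRange 0 n 1).sum = ((n - 0).toNat : Int) * (((n - 0).toNat : Int) - 1) := by
  rw [PySem.List.pyRange_one]
  exact sum_range_int (n - 0).toNat

theorem natural_stack_spec : Claim_equal_natural_stack := by
  intro length iterations _
  unfold Spec_natural_stack natural_stack natural_stack_alt
  simp only [List.nil_append]
  rw [foldl_pvIterStep, PySem.List.length_pyRange_one]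
  have hm : pvM length = (((length - 1) - 0).toNat : Int) := by unfold pvM; split <;> omega
  have hs := sum_pyRange_two (length - 1)
  have h2 : (0:Int) < 2 := by omega
  rw [hm, PySem.Int.floordiv_eq_ediv_of_pos h2, ← hs,
    Int.mul_ediv_cancel_left _ (by omega : (2:Int) ≠ 0)]
  simp
  exact Or.inl (by unfold pvIt; split <;> omega)
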